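-- pv_equiv track=rewrite | github.com/DESONGs/0t-skill-hackson | src/ot_skill_enterprise/style_distillation/extractors.py | _activity_windows
-- ===== SOURCE A (Python) =====
-- from typing import Any, Iterable
--
-- _WINDOWS = (
--     (0, 6, "asia-late"),
--     (6, 12, "asia-open"),
--     (12, 18, "europe-overlap"),
--     (18, 24, "us-session"),
-- )
--
-- def _unique_strings(values: Iterable[Any]) -> tuple[str, ...]:
--     seen: set[str] = set()
--     items: list[str] = []
--     for value in values:
--         text = str(value or "").strip()
--         if not text or text in seen:
--             continue
--         seen.add(text)
--         items.append(text)
--     return tuple(items)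
--
-- def _activity_windows(hours: Iterable[int]) -> tuple[str, ...]:
--     labels: list[str] = []
--     for hour in hours:
--         for start, end, label in _WINDOWS:
--             if start <= hour < end:
--                 labels.append(label)
--                 break
--     return _unique_strings(labels)
-- ===== SOURCE B (Python) =====
-- _LABELS = ("asia-late", "asia-open", "europe-overlap", "us-session")
--
-- def _activity_windows(hours):
--     labels = [_LABELS[int(h // 6)] for h in hours if 0 <= h < 24]
--     return tuple(dict.fromkeys(labels))
-- ===== Notes on version B (the rewrite author's own statement) =====
-- stated objective: simpler
-- what changed: Replaces the inner 4-window comparison scan with direct arithmetic bucketing (_LABELS[h // 6] for 0 <= h < 24) and the generic set+list _unique_strings helper with an inline dict.fromkeys insertion-ordered dedup.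
import Mathlib
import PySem

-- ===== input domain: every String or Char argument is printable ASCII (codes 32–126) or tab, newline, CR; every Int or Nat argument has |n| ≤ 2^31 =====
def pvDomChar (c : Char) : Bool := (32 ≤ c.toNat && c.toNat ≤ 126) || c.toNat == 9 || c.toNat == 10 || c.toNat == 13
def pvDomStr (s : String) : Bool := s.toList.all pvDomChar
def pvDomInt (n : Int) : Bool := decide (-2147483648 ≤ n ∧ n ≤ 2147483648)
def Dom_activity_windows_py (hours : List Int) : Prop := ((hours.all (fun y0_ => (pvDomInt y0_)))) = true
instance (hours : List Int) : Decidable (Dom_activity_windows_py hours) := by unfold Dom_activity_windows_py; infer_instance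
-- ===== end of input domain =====

-- B replaces the 4-window linear scan with arithmetic bucketing (label index = hour // 6)
-- and the set+list dedup helper with an insertion-ordered dict.fromkeys dedup; objective: simpler.

-- ===== PORT A =====
def pvWindows : List (Int × Int × String) :=
  [(0, 6, "asia-late"), (6, 12, "asia-open"), (12, 18, "europe-overlap"), (18, 24, "us-session")]

-- inner 'for start, end, label in _WINDOWS: … break' loop
def pvScan (hour : Int) : List (Int × Int × String) → List String → List String
  | [], acc => acc
  | (s, e, l) :: rest, acc =>
      if s ≤ hour ∧ hour < e then acc ++ [l] else pvScan hour rest acc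

-- _unique_strings (values are strings here, so str() is identity and 'value or ""' tests emptiness)
def pvUniqueStep (st : PySem.Set String × List String) (value : String) : PySem.Set String × List String :=
  let text := PySem.Str.strip (if value == "" then "" else value)
  if text == "" || PySem.Set.contains st.1 text then st
  else (PySem.Set.add st.1 text, st.2 ++ [text])

def pvUniqueStrings (values : List String) : List String :=
  (values.foldl pvUniqueStep (PySem.Set.empty, [])).2

def activity_windows_py (hours : List Int) : List String :=
  pvUniqueStrings (hours.foldl (fun acc h => pvScan h pvWindows acc) [])

-- ===== PORT B =====
def pvLabels : List String := ["asia-late", "asia-open", "europe-overlap", "us-session"]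

def activity_windows_py_alt (hours : List Int) : List String :=
  PySem.List.dedup
    ((hours.filter (fun h => decide (0 ≤ h) && decide (h < 24))).map
      (fun h => (PySem.List.pyGet? pvLabels (PySem.Int.floordiv h 6)).getD ""))

-- ===== PRECONDITION & SPEC =====
def Spec_activity_windows_py (hours : List Int) (out : List String) : Prop := out = activity_windows_py_alt hours
instance (hours : List Int) (out : List String) : Decidable (Spec_activity_windows_py hours out) := by unfold Spec_activity_windows_py; infer_instance

-- ===== CLAIM (what is proved, stated in full; the proofs are below) =====
def Claim_equal_activity_windows_py : Prop := ∀ (hours : List Int), Dom_activity_windows_py hours → Spec_activity_windows_py hours (activity_windows_py hours)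

-- ===== LEMMAS AND PROOFS =====

-- B's per-hour contribution
def pvBucket (h : Int) : List String :=
  if 0 ≤ h ∧ h < 24 then [(PySem.List.pyGet? pvLabels (PySem.Int.floordiv h 6)).getD ""] else []

lemma pvScan_eq (h : Int) (acc : List String) :
    pvScan h pvWindows acc = acc ++ pvBucket h := by
  unfold pvWindows pvBucket
  by_cases c0 : 0 ≤ h ∧ h < 6
  · have hf : h / 6 = 0 := by omega
    simp [pvScan, c0, show (0:Int) ≤ h ∧ h < 24 by omega, hf,
      PySem.List.pyGet?, PySem.List.pyIdx?, pvLabels]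
  · by_cases c1 : 6 ≤ h ∧ h < 12
    · have hf : h / 6 = 1 := by omega
      simp [pvScan, show ¬((0:Int) ≤ h ∧ h < 6) by omega, c1,
        show (0:Int) ≤ h ∧ h < 24 by omega, hf, PySem.List.pyGet?, PySem.List.pyIdx?, pvLabels]
    · by_cases c2 : 12 ≤ h ∧ h < 18
      · have hf : h / 6 = 2 := by omega
        simp [pvScan, show ¬(h < 6) by omega, show ¬(h < 12) by omega,
          c2, show (0:Int) ≤ h ∧ h < 24 by omega, hf, PySem.List.pyGet?, PySem.List.pyIdx?, pvLabels]
      · by_cases c3 : 18 ≤ h ∧ h < 24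
        · have hf : h / 6 = 3 := by omega
          simp [pvScan, show ¬(h < 6) by omega, show ¬(h < 12) by omega,
            show ¬(h < 18) by omega, c3, show (0:Int) ≤ h ∧ h < 24 by omega, hf,
            PySem.List.pyGet?, PySem.List.pyIdx?, pvLabels]
        · simp [pvScan, show ¬((0:Int) ≤ h ∧ h < 6) by omega, show ¬((6:Int) ≤ h ∧ h < 12) by omega,
            show ¬((12:Int) ≤ h ∧ h < 18) by omega, show ¬((18:Int) ≤ h ∧ h < 24) by omega,
            show ¬((0:Int) ≤ h ∧ h < 24) by omega]

lemma pvCollect_eq (hours : List Int) (acc : List String) :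
    hours.foldl (fun acc h => pvScan h pvWindows acc) acc =
      acc ++ (hours.filter (fun h => decide (0 ≤ h) && decide (h < 24))).map
        (fun h => (PySem.List.pyGet? pvLabels (PySem.Int.floordiv h 6)).getD "") := by
  induction hours generalizing acc with
  | nil => simp
  | cons h t ih =>
      rw [List.foldl_cons]
      show (t.foldl (fun acc h => pvScan h pvWindows acc) (pvScan h pvWindows acc)) = _
      rw [ih, pvScan_eq]
      by_cases c : 0 ≤ h ∧ h < 24
      · have hc : (decide (0 ≤ h) && decide (h < 24)) = true := by
          simp only [Bool.and_eq_true, decide_eq_true_eq]; exact c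
        simp [pvBucket, c, hc]
      · have hc : ¬(decide (0 ≤ h) && decide (h < 24)) = true := by
          simp only [Bool.and_eq_true, decide_eq_true_eq]; exact c
        simp [pvBucket, c, hc]

lemma pvLabel_props {x : String} (hx : x ∈ pvLabels) :
    PySem.Str.strip x = x ∧ x ≠ "" := by
  simp only [pvLabels, List.mem_cons, List.not_mem_nil, or_false] at hx
  rcases hx with rfl | rfl | rfl | rfl <;> exact ⟨by decide, by decide⟩

-- _unique_strings keeps seen and items equal; on label lists it is exactly dict.fromkeys dedup
lemma pvUnique_fold (L : List String) (hL : ∀ x ∈ L, x ∈ pvLabels) (s : List String) :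
    L.foldl pvUniqueStep (s, s) = (L.foldl PySem.Set.add s, L.foldl PySem.Set.add s) := by
  induction L generalizing s with
  | nil => rfl
  | cons v t ih =>
      have hv := pvLabel_props (hL v (by simp))
      have ht : ∀ x ∈ t, x ∈ pvLabels := fun x hx => hL x (by simp [hx])
      simp only [List.foldl_cons]
      have hstep : pvUniqueStep (s, s) v = (PySem.Set.add s v, PySem.Set.add s v) := by
        unfold pvUniqueStep
        by_cases hm : v ∈ s
        · simp [PySem.Set.contains, PySem.Set.add, hv.1, hv.2, hm]
        · simp [PySem.Set.contains, PySem.Set.add, hv.1, hv.2, hm]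
      rw [hstep, ih ht]

lemma pvUnique_eq_dedup (L : List String) (hL : ∀ x ∈ L, x ∈ pvLabels) :
    pvUniqueStrings L = PySem.List.dedup L := by
  unfold pvUniqueStrings
  have : (PySem.Set.empty : PySem.Set String) = ([] : List String) := rfl
  rw [show ((PySem.Set.empty : PySem.Set String), ([] : List String)) = (([] : List String), ([] : List String)) from rfl,
    pvUnique_fold L hL []]
  simp [PySem.List.dedup_eq_ofList, PySem.Set.ofList_eq_foldl]

lemma pvMapped_mem (hours : List Int) :
    ∀ x ∈ (hours.filter (fun h => decide (0 ≤ h) && decide (h < 24))).map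
      (fun h => (PySem.List.pyGet? pvLabels (PySem.Int.floordiv h 6)).getD ""), x ∈ pvLabels := by
  intro x hx
  simp only [List.mem_map, List.mem_filter, Bool.and_eq_true, decide_eq_true_eq] at hx
  obtain ⟨h, ⟨_, h0, h24⟩, rfl⟩ := hx
  have h6 : (0 : Int) < 6 := by norm_num
  have hq0 : 0 ≤ PySem.Int.floordiv h 6 := by
    have := (PySem.Int.le_floordiv_iff_mul_le (a := h) (b := 6) (q := 0) h6); omega
  have hq4 : PySem.Int.floordiv h 6 < 4 := by
    have := (PySem.Int.floordiv_lt_iff_lt_mul (a := h) (b := 6) (q := 4) h6); omega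
  interval_cases hq : PySem.Int.floordiv h 6 <;> simp [PySem.List.pyGet?, PySem.List.pyIdx?, pvLabels]

-- ===== VERDICT (by name: the statement is the Claim_ definition above) =====
theorem activity_windows_py_spec : Claim_equal_activity_windows_py := by
  intro hours _
  unfold Spec_activity_windows_py activity_windows_py activity_windows_py_alt
  rw [pvCollect_eq hours [], List.nil_append,
    pvUnique_eq_dedup _ (pvMapped_mem hours)]
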